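-- pv_equiv track=rewrite | github.com/JonRivera/cs-guided-project-hash-tables-ii | src/CGA_Practice.py | mutateTheArray
-- ===== SOURCE A (Python) =====
-- def mutateTheArray(n, a):
--     new_list = []
--     for index in range(n):
--         temp = 0
--         for new_element in [index - 1, index, index + 1]:
--             if new_element < 0 or new_element > n - 1:
--                 new_element = 0
--                 temp += 0
--             else:
--                 temp += a[new_element]
--         new_list.append(temp)
--     return new_list
-- ===== SOURCE B (Python) =====
-- def mutateTheArray(n, a):
--     # prefix[k] = a[0] + ... + a[k-1]; each window sum is an O(1) prefix query
--     prefix = [0]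
--     s = 0
--     for k in range(n):
--         s += a[k]
--         prefix.append(s)
--     out = []
--     for i in range(n):
--         lo = max(i - 1, 0)
--         hi = min(i + 1, n - 1)
--         out.append(prefix[hi + 1] - prefix[lo])
--     return out
-- ===== Notes on version B (the rewrite author's own statement) =====
-- stated objective: alternative
-- what changed: Replaces the per-index rescan of the three neighbors (with explicit out-of-range zeroing) by a prefix-sum table built once and O(1) clamped-window range queries prefix[min(i+1,n-1)+1]-prefix[max(i-1,0)].
import Mathlib
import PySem

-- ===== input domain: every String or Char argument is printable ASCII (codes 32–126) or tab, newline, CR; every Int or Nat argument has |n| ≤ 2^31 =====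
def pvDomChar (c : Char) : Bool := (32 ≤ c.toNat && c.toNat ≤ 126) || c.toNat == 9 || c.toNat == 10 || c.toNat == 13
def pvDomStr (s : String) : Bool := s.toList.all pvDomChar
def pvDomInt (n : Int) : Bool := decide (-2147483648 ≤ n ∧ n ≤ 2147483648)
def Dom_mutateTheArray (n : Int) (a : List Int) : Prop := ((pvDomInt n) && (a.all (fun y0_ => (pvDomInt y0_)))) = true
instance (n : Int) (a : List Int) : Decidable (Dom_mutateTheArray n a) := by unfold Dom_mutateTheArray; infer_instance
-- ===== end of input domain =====

-- B replaces A's per-index rescan of the three neighbors by a prefix-sum table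
-- built once, answering each clamped window sum as one O(1) range query (objective: alternative).

-- ===== PORT A =====
def mutateTheArray (n : Int) (a : List Int) : List Int :=
  (PySem.List.pyRange 0 n 1).foldl (fun new_list index =>
    new_list ++ [([index - 1, index, index + 1]).foldl (fun temp new_element =>
      if new_element < 0 ∨ new_element > n - 1 then temp + 0
      else temp + (PySem.List.pyGet? a new_element).getD 0) 0]) []

-- ===== PORT B =====
def mutateTheArray_alt (n : Int) (a : List Int) : List Int :=
  let st := (PySem.List.pyRange 0 n 1).foldl (fun (st : List Int × Int) k =>
      let s := st.2 + (PySem.List.pyGet? a k).getD 0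
      (st.1 ++ [s], s)) ([0], 0)
  let pfx := st.1
  (PySem.List.pyRange 0 n 1).foldl (fun out i =>
      let lo := max (i - 1) 0
      let hi := min (i + 1) (n - 1)
      out ++ [(PySem.List.pyGet? pfx (hi + 1)).getD 0 - (PySem.List.pyGet? pfx lo).getD 0]) []

-- ===== PRECONDITION & SPEC =====
-- Pre_ excludes exactly the inputs where Python A raises IndexError: n > len(a)
-- (the loop reads a[index] for index up to n-1).
def Pre_mutateTheArray (n : Int) (a : List Int) : Prop := n ≤ (a.length : Int)
instance (n : Int) (a : List Int) : Decidable (Pre_mutateTheArray n a) := by unfold Pre_mutateTheArray; infer_instance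
def pvWitness_mutateTheArray : Int × List Int := (3, [1, 2, 3])
def Spec_mutateTheArray (n : Int) (a : List Int) (out : List Int) : Prop := out = mutateTheArray_alt n a
instance (n : Int) (a : List Int) (out : List Int) : Decidable (Spec_mutateTheArray n a out) := by unfold Spec_mutateTheArray; infer_instance

-- ===== CLAIM (what is proved, stated in full; the proofs are below) =====
def Claim_equal_mutateTheArray : Prop := ∀ (n : Int) (a : List Int), Dom_mutateTheArray n a → Pre_mutateTheArray n a → Spec_mutateTheArray n a (mutateTheArray n a)

-- ===== LEMMAS AND PROOFS =====

-- partial sums of a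
def pvS (a : List Int) (k : Nat) : Int := (a.take k).sum

lemma pvS_succ (a : List Int) (k : Nat) (hk : k < a.length) :
    pvS a (k + 1) = pvS a k + (a[k]?).getD 0 := by
  simp only [pvS, List.take_add_one, List.sum_append, List.getElem?_eq_getElem hk]
  simp

-- the prefix-building fold of B computes the table of partial sums
lemma pvPrefix_eq (a : List Int) (m : Nat) (hm : m ≤ a.length) :
    (PySem.List.pyRange 0 (m : Int) 1).foldl (fun (st : List Int × Int) k =>
      let s := st.2 + (PySem.List.pyGet? a k).getD 0
      (st.1 ++ [s], s)) ([0], 0)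
    = ((List.range (m + 1)).map (pvS a), pvS a m) := by
  induction m with
  | zero => simp [PySem.List.pyRange_one_eq_nil (by omega : (0:Int) ≤ 0), pvS]
  | succ m ih =>
    have hm' : m ≤ a.length := by omega
    rw [show ((m + 1 : Nat) : Int) = (m : Int) + 1 by push_cast; ring,
        PySem.List.pyRange_one_succ_right (by positivity), List.foldl_append,
        ih hm']
    simp only [List.foldl_cons, List.foldl_nil, PySem.List.pyGet?_natCast]
    rw [← pvS_succ a m (by omega)]
    simp [List.range_succ]

-- lookup in the prefix table
lemma pvPrefix_get (a : List Int) (m : Nat) (j : Int) (h0 : 0 ≤ j) (hj : j ≤ (m : Int)) :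
    (PySem.List.pyGet? ((List.range (m + 1)).map (pvS a)) j).getD 0 = pvS a j.toNat := by
  have hjn : j = (j.toNat : Int) := by omega
  rw [hjn, PySem.List.pyGet?_natCast]
  have hlt : j.toNat < m + 1 := by omega
  simp [hlt]
  congr 1
  omega
theorem mutateTheArray_spec : Claim_equal_mutateTheArray := by
  intro n a _ hpre
  simp only [Spec_mutateTheArray, mutateTheArray, mutateTheArray_alt, Pre_mutateTheArray] at *
  by_cases hn : n ≤ 0
  · rw [PySem.List.pyRange_one_eq_nil hn]; simp
  · -- n ≥ 1; write n = m with m : Nat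
    obtain ⟨m, rfl⟩ : ∃ m : Nat, n = (m : Int) := ⟨n.toNat, by omega⟩
    have hm : m ≤ a.length := by exact_mod_cast hpre
    rw [pvPrefix_eq a m hm]
    simp only []
    rw [PySem.List.foldl_append_singleton_eq_map, PySem.List.foldl_append_singleton_eq_map]
    simp only [List.nil_append]
    apply List.map_congr_left
    intro i hi
    rw [PySem.List.mem_pyRange_one] at hi
    obtain ⟨hi0, him⟩ := hi
    obtain ⟨k, rfl⟩ : ∃ k : Nat, i = (k : Int) := ⟨i.toNat, by omega⟩
    have hkm : k < m := by exact_mod_cast him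
    -- evaluate A's inner 3-element fold
    simp only [List.foldl_cons, List.foldl_nil]
    have hlo : max ((k : Int) - 1) 0 = ((k - 1 : Nat) : Int) := by omega
    have hhi1 : min ((k : Int) + 1) ((m : Int) - 1) + 1 = ((min (k + 1) (m - 1) + 1 : Nat) : Int) := by omega
    rw [hlo, hhi1,
        pvPrefix_get a m _ (by positivity) (by omega),
        pvPrefix_get a m _ (by positivity) (by omega)]
    simp only [Int.toNat_natCast]
    -- now pure arithmetic over the window
    have hmid : ¬((k:Int) < 0 ∨ (k:Int) > (m:Int) - 1) := by omega
    rw [if_neg hmid, PySem.List.pyGet?_natCast]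
    by_cases hk0 : k = 0
    · subst hk0
      rw [if_pos (show ((0:Nat):Int) - 1 < 0 ∨ ((0:Nat):Int) - 1 > (m:Int) - 1 from Or.inl (by norm_num))]
      by_cases h1 : m = 1
      · subst h1
        rw [if_pos (show ((0:Nat):Int) + 1 < 0 ∨ ((0:Nat):Int) + 1 > ((1:Nat):Int) - 1 from Or.inr (by norm_num))]
        simp [pvS, List.take_add_one, List.getElem?_eq_getElem (by omega : 0 < a.length)]
      · rw [if_neg (by omega : ¬(((0:Nat):Int) + 1 < 0 ∨ ((0:Nat):Int) + 1 > (m:Int) - 1))]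
        rw [show ((0:Nat):Int) + 1 = ((1:Nat):Int) by norm_num, PySem.List.pyGet?_natCast]
        have hmin : min (0 + 1) (m - 1) = 1 := by omega
        rw [hmin]
        have hm2 : 2 ≤ m := by omega
        have e1 := pvS_succ a 0 (by omega)
        have e2 := pvS_succ a 1 ((by omega : (1:Nat) < m).trans_le hm)
        have e0 : pvS a 0 = 0 := by simp [pvS]
        norm_num at e1 e2 ⊢
        linarith
    · have hk1 : 1 ≤ k := by omega
      rw [if_neg (show ¬(((k:Int) - 1) < 0 ∨ ((k:Int) - 1) > (m:Int) - 1) by omega)]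
      rw [show (k:Int) - 1 = ((k - 1 : Nat):Int) by omega, PySem.List.pyGet?_natCast]
      have hks : pvS a k = pvS a (k - 1) + (a[k - 1]?).getD 0 := by
        have h := pvS_succ a (k - 1) (by omega)
        rwa [Nat.sub_add_cancel hk1] at h
      have ek : pvS a (k + 1) = pvS a k + (a[k]?).getD 0 := pvS_succ a k (by omega)
      by_cases hlast : k + 1 > m - 1
      · rw [if_pos (show (k:Int) + 1 < 0 ∨ (k:Int) + 1 > (m:Int) - 1 from Or.inr (by omega))]
        have hmin : min (k + 1) (m - 1) + 1 = k + 1 := by omega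
        rw [hmin]
        linarith
      · rw [if_neg (by omega : ¬((k:Int) + 1 < 0 ∨ (k:Int) + 1 > (m:Int) - 1))]
        rw [show (k:Int) + 1 = ((k + 1 : Nat):Int) by push_cast; ring, PySem.List.pyGet?_natCast]
        have hmin : min (k + 1) (m - 1) + 1 = k + 2 := by omega
        rw [hmin]
        have ek1 : pvS a (k + 2) = pvS a (k + 1) + (a[k + 1]?).getD 0 := pvS_succ a (k + 1) (by omega)
        linarith
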